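-- pv_equiv track=rewrite | github.com/hypan599/think_complexity | Itertool.py | alphabet_num_cycle
-- ===== SOURCE A (Python) =====
-- def alphabet_num_cycle(n):
--     i = 0
--     total = 1
--     while True:
--         if total >= n:
--             break
--         i += 1
--         for letter in "abcdefghijklmnopqrstuvwxyz".lower():
--             total += 1
--             yield letter + str(i)
-- ===== SOURCE B (Python) =====
-- def alphabet_num_cycle(n):
--     num_batches = max(0, -(-(n - 1) // 26))
--     for i in range(1, num_batches + 1):
--         for letter in "abcdefghijklmnopqrstuvwxyz":
--             yield letter + str(i)
-- ===== Notes on version B (the rewrite author's own statement) =====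
-- stated objective: simpler
-- what changed: Replaces the while-True loop with a running total and mid-loop break by a closed-form ceiling-division count of full 26-letter batches and two plain nested for loops.
import Mathlib
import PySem

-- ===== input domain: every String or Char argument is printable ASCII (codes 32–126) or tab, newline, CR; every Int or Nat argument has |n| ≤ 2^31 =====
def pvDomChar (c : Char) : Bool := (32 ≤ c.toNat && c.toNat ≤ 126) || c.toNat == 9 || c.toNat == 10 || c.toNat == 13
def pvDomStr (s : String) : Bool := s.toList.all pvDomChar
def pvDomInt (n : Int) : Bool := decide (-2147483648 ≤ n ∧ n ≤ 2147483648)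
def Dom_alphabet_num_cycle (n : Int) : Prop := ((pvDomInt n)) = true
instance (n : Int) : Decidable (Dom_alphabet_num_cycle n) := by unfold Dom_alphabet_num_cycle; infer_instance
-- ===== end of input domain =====

-- B replaces A's while-True loop with a running total and mid-loop break by a closed-form
-- ceiling-division batch count and two nested for loops (objective: simpler).

-- ===== PORT A =====
-- one full pass of the inner for-loop: yields letter+str(i) for each of the 26 letters
def pvBatchA (i : Int) : List String :=
  "abcdefghijklmnopqrstuvwxyz".toList.map (fun c => String.ofList [c] ++ PySem.Int.toStr i)

-- the while-True loop; each iteration the inner for-loop adds 26 to total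
def pvLoopA (n i total : Int) : List String :=
  if total ≥ n then []
  else pvBatchA (i + 1) ++ pvLoopA n (i + 1) (total + 26)
termination_by (n - total).toNat
decreasing_by omega

def alphabet_num_cycle (n : Int) : List String := pvLoopA n 0 1

-- ===== PORT B =====
def pvBatchB (i : Int) : List String :=
  "abcdefghijklmnopqrstuvwxyz".toList.map (fun c => String.ofList [c] ++ PySem.Int.toStr i)

def alphabet_num_cycle_alt (n : Int) : List String :=
  let numBatches := max 0 (-(PySem.Int.floordiv (-(n - 1)) 26))
  (PySem.List.pyRange 1 (numBatches + 1) 1).flatMap (fun i => pvBatchB i)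

-- ===== PRECONDITION & SPEC =====
def Spec_alphabet_num_cycle (n : Int) (out : List String) : Prop := out = alphabet_num_cycle_alt n
instance (n : Int) (out : List String) : Decidable (Spec_alphabet_num_cycle n out) := by unfold Spec_alphabet_num_cycle; infer_instance

-- ===== CLAIM (what is proved, stated in full; the proofs are below) =====
def Claim_equal_alphabet_num_cycle : Prop := ∀ (n : Int), Dom_alphabet_num_cycle n → Spec_alphabet_num_cycle n (alphabet_num_cycle n)

-- ===== LEMMAS AND PROOFS =====

-- the ceiling count c = -((-(n-1)) // 26) satisfies: c ≤ i ↔ n ≤ 1 + 26*i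
theorem pvCeil_le_iff (n i : Int) :
    -(PySem.Int.floordiv (-(n - 1)) 26) ≤ i ↔ n ≤ 1 + 26 * i := by
  rw [PySem.Int.floordiv_eq_ediv_of_pos (by norm_num : (0:Int) < 26)]
  omega

-- loop invariant: starting at total = 1 + 26*i, the loop produces the batches i+1 … B
theorem pvLoopA_eq (n : Int) (B : Int)
    (hB : B = max 0 (-(PySem.Int.floordiv (-(n - 1)) 26))) :
    ∀ (k : Nat) (i : Int), 0 ≤ i → (B - i).toNat ≤ k →
      pvLoopA n i (1 + 26 * i) = (PySem.List.pyRange (i + 1) (B + 1) 1).flatMap (fun j => pvBatchB j) := by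
  intro k
  induction k with
  | zero =>
    intro i hi hk
    have hle : B ≤ i := by omega
    have hn : 1 + 26 * i ≥ n := by
      have := (pvCeil_le_iff n i).1 (by omega)
      omega
    rw [pvLoopA, if_pos hn, PySem.List.pyRange_one_eq_nil (by omega)]
    simp
  | succ k ih =>
    intro i hi hk
    by_cases hn : 1 + 26 * i ≥ n
    · have hle : B ≤ i := by
        have := (pvCeil_le_iff n i).2 hn
        omega
      rw [pvLoopA, if_pos hn, PySem.List.pyRange_one_eq_nil (by omega)]
      simp
    · have hgt : i < B := by
        by_contra h
        exact hn ((pvCeil_le_iff n i).1 (by omega))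
      rw [pvLoopA, if_neg hn, PySem.List.pyRange_one_cons (by omega)]
      have h26 : 1 + 26 * i + 26 = 1 + 26 * (i + 1) := by ring
      rw [h26, ih (i + 1) (by omega) (by omega)]
      simp [pvBatchA, pvBatchB]

-- ===== VERDICT (by name: the statement is the Claim_ definition above) =====
theorem alphabet_num_cycle_spec : Claim_equal_alphabet_num_cycle := by
  intro n _
  unfold Spec_alphabet_num_cycle alphabet_num_cycle alphabet_num_cycle_alt
  have h := pvLoopA_eq n (max 0 (-(PySem.Int.floordiv (-(n - 1)) 26))) rfl
    (max 0 (-(PySem.Int.floordiv (-(n - 1)) 26))).toNat 0 le_rfl (by omega)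
  simpa using h
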